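-- pv_equiv track=rewrite | github.com/GonzaloReyes022/DE-Training | python_interview_exercises.py | dup_intigente
-- ===== SOURCE A (Python) =====
-- def dup_intigente(dict_reg, field, duplicado_inteligente):
--     for registro in dict_reg:
--         value = registro[field]
--         if value in duplicado_inteligente:
--             if registro['updated'] > duplicado_inteligente[value]['updated']:
--                 duplicado_inteligente[value] = registro.copy()
--         else:
--             duplicado_inteligente[value] = registro.copy()
--     return (list(duplicado_inteligente.values()))
-- ===== SOURCE B (Python) =====
-- # Two-pass re-implementation: group records by field value, reduce each group to its
-- # winner by a strict-'>' scan, then merge winners into duplicado_inteligente (which is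
-- # mutated in place, exactly like the original).
-- def dup_intigente(dict_reg, field, duplicado_inteligente):
--     index = {}
--     for registro in dict_reg:
--         index.setdefault(registro[field], []).append(registro)
--     for value, grupo in index.items():
--         mejor = grupo[0]
--         for r in grupo[1:]:
--             if r['updated'] > mejor['updated']:
--                 mejor = r
--         if value not in duplicado_inteligente:
--             duplicado_inteligente[value] = mejor.copy()
--         elif mejor['updated'] > duplicado_inteligente[value]['updated']:
--             duplicado_inteligente[value] = mejor.copy()
--     return (list(duplicado_inteligente.values()))
-- ===== Notes on version B (the rewrite author's own statement) =====
-- stated objective: alternative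
-- what changed: Replaces A's single compare-in-place pass with a two-phase group-and-reduce: first build an index grouping records per field value, then reduce each group to its earliest maximal-'updated' record by a strict-> scan and merge the winners into the dict.
import Mathlib
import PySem

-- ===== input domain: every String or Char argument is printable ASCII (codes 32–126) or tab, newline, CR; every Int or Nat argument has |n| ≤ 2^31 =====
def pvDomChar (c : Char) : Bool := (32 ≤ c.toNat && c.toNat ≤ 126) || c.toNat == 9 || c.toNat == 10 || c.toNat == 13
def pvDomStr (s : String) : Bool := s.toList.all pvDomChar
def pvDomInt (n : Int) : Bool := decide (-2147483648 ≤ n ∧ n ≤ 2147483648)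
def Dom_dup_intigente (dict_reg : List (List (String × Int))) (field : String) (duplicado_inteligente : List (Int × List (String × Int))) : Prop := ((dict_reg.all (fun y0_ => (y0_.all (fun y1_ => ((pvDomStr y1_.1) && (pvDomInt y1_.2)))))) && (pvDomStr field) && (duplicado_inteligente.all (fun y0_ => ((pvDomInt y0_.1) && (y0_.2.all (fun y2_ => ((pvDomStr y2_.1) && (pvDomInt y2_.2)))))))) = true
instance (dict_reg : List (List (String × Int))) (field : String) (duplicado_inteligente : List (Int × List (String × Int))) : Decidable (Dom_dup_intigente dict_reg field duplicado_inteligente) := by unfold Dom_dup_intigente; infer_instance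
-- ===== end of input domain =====

-- B replaces A's single compare-in-place pass by a group-by-value / reduce-group / merge
-- two-phase algorithm (objective: alternative; equal cost). Both A and B mutate the Python
-- dict argument `duplicado_inteligente` in the same way; the theorems are about the return value.

-- ===== PORT A =====
-- registro['updated'] (records are Python dicts; KeyError is excluded by Pre_, so getD's default never fires inside Pre_)
def pvUpd (r : PySem.Dict String Int) : Int := r.getD "updated" 0

-- the body of A's loop: compare-and-maybe-store one record
def pvStepA (field : String) (d : PySem.Dict Int (PySem.Dict String Int)) (r : PySem.Dict String Int) : PySem.Dict Int (PySem.Dict String Int) :=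
  let value := r.getD field 0
  if d.contains value then
    if pvUpd r > pvUpd (d.getD value PySem.Dict.empty) then d.insert value r else d
  else d.insert value r

def dup_intigente (dict_reg : List (List (String × Int))) (field : String) (duplicado_inteligente : List (Int × List (String × Int))) : List (List (String × Int)) :=
  ((dict_reg.foldl (fun d registro => pvStepA field d (PySem.Dict.ofList registro))
      (PySem.Dict.ofList (duplicado_inteligente.map (fun p => (p.1, PySem.Dict.ofList p.2))))).values).map
    PySem.Dict.items

-- ===== PORT B =====
-- mejor = grupo[0]; for r in grupo[1:]: if r['updated'] > mejor['updated']: mejor = r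
-- (groups produced by the index are never empty, so the [] branch never fires)
def pvBest (g : List (PySem.Dict String Int)) : PySem.Dict String Int :=
  match g with
  | [] => PySem.Dict.empty
  | h :: t => t.foldl (fun mejor r => if pvUpd r > pvUpd mejor then r else mejor) h

-- the body of B's second loop: merge one group's winner into the dict
def pvStepB (d : PySem.Dict Int (PySem.Dict String Int)) (p : Int × List (PySem.Dict String Int)) : PySem.Dict Int (PySem.Dict String Int) :=
  let mejor := pvBest p.2
  if !(d.contains p.1) then d.insert p.1 mejor
  else if pvUpd mejor > pvUpd (d.getD p.1 PySem.Dict.empty) then d.insert p.1 mejor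
  else d

-- B's first loop: index.setdefault(registro[field], []).append(registro)
def pvIndex (field : String) (dict_reg : List (List (String × Int))) : PySem.Dict Int (List (PySem.Dict String Int)) :=
  dict_reg.foldl (fun ix registro =>
    let r := PySem.Dict.ofList registro
    ix.modify (r.getD field 0) [] (fun g => g ++ [r])) PySem.Dict.empty

def dup_intigente_alt (dict_reg : List (List (String × Int))) (field : String) (duplicado_inteligente : List (Int × List (String × Int))) : List (List (String × Int)) :=
  (((pvIndex field dict_reg).items.foldl pvStepB
      (PySem.Dict.ofList (duplicado_inteligente.map (fun p => (p.1, PySem.Dict.ofList p.2))))).values).map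
    PySem.Dict.items

-- ===== PRECONDITION & SPEC =====
-- Pre_ excludes exactly the inputs on which the Python A raises a KeyError: a record lacking
-- the `field` key; a record lacking 'updated' whose value occurs in another record or as a key
-- of the initial dict (only then does A's comparison read it); and an initial-dict entry
-- reached by some record's value that lacks 'updated'.  B raises on exactly the same inputs.
def Pre_dup_intigente (dict_reg : List (List (String × Int))) (field : String) (duplicado_inteligente : List (Int × List (String × Int))) : Prop :=
  ∀ registro ∈ dict_reg,
    (PySem.Dict.ofList registro).contains field = true ∧
    ((2 ≤ (dict_reg.map (fun l => (PySem.Dict.ofList l).getD field 0)).count ((PySem.Dict.ofList registro).getD field 0) ∨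
      (PySem.Dict.ofList (duplicado_inteligente.map (fun p => (p.1, PySem.Dict.ofList p.2)))).contains ((PySem.Dict.ofList registro).getD field 0) = true) →
      (PySem.Dict.ofList registro).contains "updated" = true) ∧
    (((PySem.Dict.ofList (duplicado_inteligente.map (fun p => (p.1, PySem.Dict.ofList p.2)))).get?
        ((PySem.Dict.ofList registro).getD field 0)).all
      (fun e => e.contains "updated")) = true
instance (dict_reg : List (List (String × Int))) (field : String) (duplicado_inteligente : List (Int × List (String × Int))) : Decidable (Pre_dup_intigente dict_reg field duplicado_inteligente) := by unfold Pre_dup_intigente; infer_instance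

def pvWitness_dup_intigente : (List (List (String × Int))) × String × (List (Int × List (String × Int))) :=
  ([[("x", 1), ("updated", 2)], [("x", 1), ("updated", 5)], [("x", 2)]], "x", [(1, [("updated", 3)])])

def Spec_dup_intigente (dict_reg : List (List (String × Int))) (field : String) (duplicado_inteligente : List (Int × List (String × Int))) (out : List (List (String × Int))) : Prop := out = dup_intigente_alt dict_reg field duplicado_inteligente
instance (dict_reg : List (List (String × Int))) (field : String) (duplicado_inteligente : List (Int × List (String × Int))) (out : List (List (String × Int))) : Decidable (Spec_dup_intigente dict_reg field duplicado_inteligente out) := by unfold Spec_dup_intigente; infer_instance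

-- ===== CLAIM (what is proved, stated in full; the proofs are below) =====
def Claim_equal_dup_intigente : Prop := ∀ (dict_reg : List (List (String × Int))) (field : String) (duplicado_inteligente : List (Int × List (String × Int))), Dom_dup_intigente dict_reg field duplicado_inteligente → Pre_dup_intigente dict_reg field duplicado_inteligente → Spec_dup_intigente dict_reg field duplicado_inteligente (dup_intigente dict_reg field duplicado_inteligente)

-- ===== LEMMAS AND PROOFS =====
-- The proof in fact shows the two ports are equal on ALL inputs (Pre_ is the faithfulness
-- domain of the ports w.r.t. Python, not needed for port equality).

-- the key of a record
def pvKey (field : String) (r : PySem.Dict String Int) : Int := r.getD field 0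

-- one step of B's index-building loop, at record level
def pvIxStep (field : String) (ix : PySem.Dict Int (List (PySem.Dict String Int))) (r : PySem.Dict String Int) : PySem.Dict Int (List (PySem.Dict String Int)) :=
  ix.modify (pvKey field r) [] (fun g => g ++ [r])

-- replace-first-or-append on a raw items list: what `modify k [] (· ++ [r])` does to items
def pvModL (l : List (Int × List (PySem.Dict String Int))) (v : Int) (r : PySem.Dict String Int) : List (Int × List (PySem.Dict String Int)) :=
  match l with
  | [] => [(v, [r])]
  | (w, h) :: t => if w = v then (v, h ++ [r]) :: t else (w, h) :: pvModL t v r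

lemma best_singleton (r : PySem.Dict String Int) : pvBest [r] = r := rfl

lemma best_snoc (g : List (PySem.Dict String Int)) (hg : g ≠ []) (r : PySem.Dict String Int) :
    pvBest (g ++ [r]) = if pvUpd (pvBest g) < pvUpd r then r else pvBest g := by
  cases g with
  | nil => simp at hg
  | cons h t =>
    show (t ++ [r]).foldl (fun mejor r => if pvUpd r > pvUpd mejor then r else mejor) h
        = if pvUpd (pvBest (h :: t)) < pvUpd r then r else pvBest (h :: t)
    rw [List.foldl_append]
    rfl

-- unfolding equation for B's step function as a single || condition
lemma stepB_eq (d : PySem.Dict Int (PySem.Dict String Int)) (p : Int × List (PySem.Dict String Int)) :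
    pvStepB d p = if (!d.contains p.1 || decide (pvUpd (pvBest p.2) > pvUpd (d.getD p.1 PySem.Dict.empty))) = true
      then d.insert p.1 (pvBest p.2) else d := by
  unfold pvStepB
  dsimp only
  cases hc : d.contains p.1 with
  | false => simp
  | true =>
    simp only [Bool.not_true, Bool.false_or, decide_eq_true_eq]
    split <;> simp_all

lemma stepA_eq_of_contains (field : String) (d : PySem.Dict Int (PySem.Dict String Int)) (r : PySem.Dict String Int)
    (hc : d.contains (pvKey field r) = true) :
    pvStepA field d r = if pvUpd r > pvUpd (d.getD (pvKey field r) PySem.Dict.empty)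
      then d.insert (pvKey field r) r else d := by
  unfold pvStepA
  dsimp only
  rw [show (r.getD field 0) = pvKey field r from rfl, hc]
  simp

lemma contains_stepB_self (d : PySem.Dict Int (PySem.Dict String Int)) (p : Int × List (PySem.Dict String Int)) :
    (pvStepB d p).contains p.1 = true := by
  rw [stepB_eq]
  split
  · simp
  · rename_i h
    cases hc : d.contains p.1 with
    | true => rfl
    | false => simp [hc] at h

lemma contains_stepB_mono (d : PySem.Dict Int (PySem.Dict String Int)) (p : Int × List (PySem.Dict String Int)) (v : Int) (hv : d.contains v = true) :
    (pvStepB d p).contains v = true := by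
  rw [stepB_eq]
  split
  · simp [PySem.Dict.contains_insert, hv]
  · exact hv

-- insert at an already-present key commutes with insert at any other key
lemma insert_comm_of_contains (d : PySem.Dict Int (PySem.Dict String Int)) (k k' : Int) (v v' : PySem.Dict String Int)
    (hk : d.contains k = true) (hne : k' ≠ k) :
    (d.insert k v).insert k' v' = (d.insert k' v').insert k v := by
  have hk2 : (d.insert k' v').contains k = true := by
    simp [PySem.Dict.contains_insert, hk]
  cases hc' : d.contains k' with
  | true =>
    have hc'2 : (d.insert k v).contains k' = true := by
      simp [PySem.Dict.contains_insert, hc']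
    apply PySem.Dict.ext
    rw [PySem.Dict.items_insert_of_contains _ _ hc'2, PySem.Dict.items_insert_of_contains _ _ hk,
        PySem.Dict.items_insert_of_contains _ _ hk2, PySem.Dict.items_insert_of_contains _ _ hc']
    simp only [List.map_map]
    apply List.map_congr_left
    intro p _
    by_cases h1 : p.1 = k <;> by_cases h2 : p.1 = k' <;>
      simp_all [Function.comp]
  | false =>
    have hc'2 : (d.insert k v).contains k' = false := by
      simp [PySem.Dict.contains_insert, hc']
      exact fun h => absurd h hne
    apply PySem.Dict.ext
    rw [PySem.Dict.items_insert_of_not_contains _ _ hc'2, PySem.Dict.items_insert_of_contains _ _ hk,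
        PySem.Dict.items_insert_of_contains _ _ hk2, PySem.Dict.items_insert_of_not_contains _ _ hc']
    rw [List.map_append]
    simp [hne]

-- one stepB at a foreign key commutes with stepA (whose key is already present)
lemma stepB_stepA_comm (field : String) (d : PySem.Dict Int (PySem.Dict String Int)) (r : PySem.Dict String Int)
    (p : Int × List (PySem.Dict String Int)) (hc : d.contains (pvKey field r) = true) (hne : p.1 ≠ pvKey field r) :
    pvStepB (pvStepA field d r) p = pvStepA field (pvStepB d p) r := by
  have hmono : (pvStepB d p).contains (pvKey field r) = true := contains_stepB_mono d p _ hc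
  have e1 : (pvStepA field d r).contains p.1 = d.contains p.1 := by
    rw [stepA_eq_of_contains field d r hc]
    split
    · simp [PySem.Dict.contains_insert, hne]
    · rfl
  have e2 : (pvStepA field d r).getD p.1 PySem.Dict.empty = d.getD p.1 PySem.Dict.empty := by
    rw [stepA_eq_of_contains field d r hc]
    split
    · rw [PySem.Dict.getD_insert]; simp [hne]
    · rfl
  have e4 : (pvStepB d p).getD (pvKey field r) PySem.Dict.empty = d.getD (pvKey field r) PySem.Dict.empty := by
    rw [stepB_eq]
    split
    · rw [PySem.Dict.getD_insert]; simp [Ne.symm hne]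
    · rfl
  rw [stepB_eq (pvStepA field d r) p, e1, e2,
      stepA_eq_of_contains field (pvStepB d p) r hmono, e4,
      stepA_eq_of_contains field d r hc, stepB_eq d p]
  split_ifs <;> first
    | rfl
    | exact insert_comm_of_contains d _ _ _ _ hc hne

-- push one stepA through a fold of stepB over groups with foreign keys
lemma fold_comm (field : String) (t : List (Int × List (PySem.Dict String Int))) (d : PySem.Dict Int (PySem.Dict String Int))
    (r : PySem.Dict String Int) (hc : d.contains (pvKey field r) = true) (ht : ∀ p ∈ t, p.1 ≠ pvKey field r) :
    t.foldl pvStepB (pvStepA field d r) = pvStepA field (t.foldl pvStepB d) r := by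
  induction t generalizing d with
  | nil => rfl
  | cons p t ih =>
    simp only [List.foldl_cons]
    rw [stepB_stepA_comm field d r p hc (ht p (by simp))]
    exact ih (pvStepB d p) (contains_stepB_mono d p _ hc) (fun q hq => ht q (by simp [hq]))

-- absorbing one more record into its (nonempty) group equals running A's step afterwards
lemma stepB_snoc (field : String) (d : PySem.Dict Int (PySem.Dict String Int)) (r : PySem.Dict String Int)
    (h : List (PySem.Dict String Int)) (hh : h ≠ []) :
    pvStepB d (pvKey field r, h ++ [r]) = pvStepA field (pvStepB d (pvKey field r, h)) r := by
  have hcs : (pvStepB d (pvKey field r, h)).contains (pvKey field r) = true :=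
    contains_stepB_self d (pvKey field r, h)
  rw [stepA_eq_of_contains field _ r hcs,
      stepB_eq d (pvKey field r, h ++ [r]), stepB_eq d (pvKey field r, h)]
  dsimp only
  rw [best_snoc h hh r]
  cases hdc : d.contains (pvKey field r) with
  | false =>
    simp only [Bool.not_false, Bool.true_or]
    rw [if_pos trivial, if_pos trivial,
        PySem.Dict.getD_insert_self, PySem.Dict.insert_insert_self]
    by_cases hc0 : pvUpd (pvBest h) < pvUpd r
    · rw [if_pos hc0, if_pos (show pvUpd r > pvUpd (pvBest h) from hc0)]
    · rw [if_neg hc0, if_neg (show ¬ pvUpd r > pvUpd (pvBest h) from hc0)]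
  | true =>
    simp only [Bool.not_true, Bool.false_or, decide_eq_true_eq]
    by_cases hbe : pvUpd (pvBest h) > pvUpd (d.getD (pvKey field r) PySem.Dict.empty)
    · rw [if_pos hbe, PySem.Dict.getD_insert_self, PySem.Dict.insert_insert_self]
      by_cases hc0 : pvUpd (pvBest h) < pvUpd r
      · rw [if_pos hc0,
            if_pos (show pvUpd r > pvUpd (d.getD (pvKey field r) PySem.Dict.empty) by omega),
            if_pos (show pvUpd r > pvUpd (pvBest h) from hc0)]
      · rw [if_neg hc0, if_neg (show ¬ pvUpd r > pvUpd (pvBest h) from hc0), if_pos hbe]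
    · rw [if_neg hbe]
      by_cases hc0 : pvUpd (pvBest h) < pvUpd r
      · rw [if_pos hc0]
      · rw [if_neg hc0,
            if_neg (show ¬ pvUpd (pvBest h) > pvUpd (d.getD (pvKey field r) PySem.Dict.empty) from hbe),
            if_neg (show ¬ pvUpd r > pvUpd (d.getD (pvKey field r) PySem.Dict.empty) by omega)]

-- main push lemma at the items-list level
lemma pushL (field : String) (l : List (Int × List (PySem.Dict String Int))) (d : PySem.Dict Int (PySem.Dict String Int))
    (r : PySem.Dict String Int) (hnd : (l.map Prod.fst).Nodup) (hne : ∀ p ∈ l, p.2 ≠ []) :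
    (pvModL l (pvKey field r) r).foldl pvStepB d = pvStepA field (l.foldl pvStepB d) r := by
  induction l generalizing d with
  | nil =>
    show pvStepB d (pvKey field r, [r]) = pvStepA field d r
    rw [stepB_eq]
    unfold pvStepA
    dsimp only
    rw [show (r.getD field 0) = pvKey field r from rfl, best_singleton]
    cases hc : d.contains (pvKey field r) <;> simp
  | cons p l ih =>
    obtain ⟨w, h⟩ := p
    unfold pvModL
    by_cases hwv : w = pvKey field r
    · subst hwv
      simp only [if_true, List.foldl_cons]
      rw [stepB_snoc field d r h (hne ⟨pvKey field r, h⟩ (by simp))]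
      apply fold_comm
      · exact contains_stepB_self d (pvKey field r, h)
      · intro q hq
        simp only [List.map_cons, List.nodup_cons] at hnd
        exact fun he => hnd.1 (he ▸ List.mem_map_of_mem hq)
    · simp only [if_neg hwv, List.foldl_cons]
      refine ih (pvStepB d (w, h)) ?_ (fun q hq => hne q (by simp [hq]))
      simp only [List.map_cons, List.nodup_cons] at hnd
      exact hnd.2

-- map-replace at a unique key equals replace-first
lemma map_rep_eq_modL (v : Int) (r : PySem.Dict String Int) :
    ∀ (l : List (Int × List (PySem.Dict String Int))) (g : List (PySem.Dict String Int)),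
      (l.map Prod.fst).Nodup → l.find? (fun p => p.1 == v) = some (v, g) →
      l.map (fun p => if (p.1 == v) = true then (v, g ++ [r]) else p) = pvModL l v r := by
  intro l
  induction l with
  | nil => intro g _ hf; simp at hf
  | cons p t ih =>
    intro g hnd hf
    obtain ⟨w, h⟩ := p
    simp only [List.map_cons, List.nodup_cons] at hnd
    by_cases hwv : w = v
    · subst hwv
      rw [List.find?_cons_of_pos (by simp)] at hf
      injection hf with hf
      injection hf with _ hg
      subst hg
      unfold pvModL
      simp only [if_true, List.map_cons, if_pos (by simp : ((w, h).1 == w) = true)]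
      congr 1
      have : ∀ q ∈ t, (if (q.1 == w) = true then (w, h ++ [r]) else q) = q := by
        intro q hq
        have : q.1 ≠ w := fun he => hnd.1 (he ▸ List.mem_map_of_mem hq)
        simp [this]
      rw [List.map_congr_left this]
      simp
    · rw [List.find?_cons_of_neg (by simp [hwv])] at hf
      unfold pvModL
      simp only [if_neg hwv, List.map_cons]
      rw [if_neg (by simp [hwv])]
      rw [ih g hnd.2 hf]

-- replace-first at an absent key appends
lemma modL_of_not_mem (l : List (Int × List (PySem.Dict String Int))) (v : Int) (r : PySem.Dict String Int)
    (hnm : ∀ p ∈ l, p.1 ≠ v) : pvModL l v r = l ++ [(v, [r])] := by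
  induction l with
  | nil => rfl
  | cons q t ih =>
    obtain ⟨w, h⟩ := q
    unfold pvModL
    rw [if_neg (hnm (w, h) (by simp)), ih (fun p hp => hnm p (by simp [hp])), List.cons_append]

-- items of `modify v [] (· ++ [r])` is replace-first-or-append, given unique keys
lemma items_modify_modL (ix : PySem.Dict Int (List (PySem.Dict String Int))) (v : Int) (r : PySem.Dict String Int)
    (hnd : ix.keys.Nodup) :
    (ix.modify v [] (fun g => g ++ [r])).items = pvModL ix.items v r := by
  unfold PySem.Dict.modify
  cases hc : ix.contains v with
  | false =>
    have hnm : ∀ p ∈ ix.items, p.1 ≠ v := by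
      intro p hp he
      unfold PySem.Dict.contains at hc
      rw [List.any_eq_false] at hc
      exact absurd (by simp [he]) (hc p hp)
    rw [PySem.Dict.items_insert_of_not_contains _ _ hc, PySem.Dict.getD_of_not_contains _ _ hc,
        modL_of_not_mem _ v r hnm]
    rfl
  | true =>
    have hf : ∃ p, ix.items.find? (fun p => p.1 == v) = some p := by
      cases hx : ix.items.find? (fun p => p.1 == v) with
      | some p => exact ⟨p, rfl⟩
      | none =>
        exfalso
        have hnone := List.find?_eq_none.mp hx
        unfold PySem.Dict.contains at hc
        rw [List.any_eq_true] at hc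
        obtain ⟨x, hx1, hx2⟩ := hc
        exact hnone x hx1 hx2
    obtain ⟨p, hp⟩ := hf
    have hpv : p.1 = v := by
      have := List.find?_some hp
      simpa using this
    have hgd : ix.getD v [] = p.2 := by
      unfold PySem.Dict.getD PySem.Dict.get?
      rw [hp]
      rfl
    rw [PySem.Dict.items_insert_of_contains _ _ hc, hgd]
    apply map_rep_eq_modL v r ix.items p.2 hnd
    rw [hp, ← hpv]

-- every group in the index is nonempty
lemma index_groups_nonempty (field : String) (rs : List (PySem.Dict String Int))
    (ix : PySem.Dict Int (List (PySem.Dict String Int))) (hix : ∀ p ∈ ix.items, p.2 ≠ []) :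
    ∀ p ∈ (rs.foldl (pvIxStep field) ix).items, p.2 ≠ [] := by
  induction rs generalizing ix with
  | nil => exact hix
  | cons r rs ih =>
    simp only [List.foldl_cons]
    apply ih
    intro p hp
    unfold pvIxStep PySem.Dict.modify at hp
    rw [PySem.Dict.mem_items_insert] at hp
    rcases hp with h | h
    · subst h; simp
    · exact hix p h.1

-- the index of rs has nodup keys
lemma index_keys_nodup (field : String) (rs : List (PySem.Dict String Int)) :
    ((rs.foldl (pvIxStep field) PySem.Dict.empty).keys).Nodup := by
  exact PySem.Dict.nodup_keys_foldl_modify_key rs (pvKey field) ([] : List (PySem.Dict String Int))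
    (fun _ r => (fun g => g ++ [r])) PySem.Dict.empty (by simp [PySem.Dict.keys_empty])

-- core: folding B's merge over the index equals folding A's step over the records
lemma core (field : String) (rs : List (PySem.Dict String Int)) (d : PySem.Dict Int (PySem.Dict String Int)) :
    ((rs.foldl (pvIxStep field) PySem.Dict.empty).items).foldl pvStepB d = rs.foldl (pvStepA field) d := by
  induction rs using List.reverseRecOn generalizing d with
  | nil => rfl
  | append_singleton xs r ih =>
    rw [List.foldl_concat, List.foldl_concat]
    show ((pvIxStep field (xs.foldl (pvIxStep field) PySem.Dict.empty) r).items).foldl pvStepB d = _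
    rw [show pvIxStep field (xs.foldl (pvIxStep field) PySem.Dict.empty) r
        = (xs.foldl (pvIxStep field) PySem.Dict.empty).modify (pvKey field r) [] (fun g => g ++ [r]) from rfl]
    rw [items_modify_modL _ _ _ (index_keys_nodup field xs)]
    rw [pushL field _ d r (index_keys_nodup field xs)
      (index_groups_nonempty field xs PySem.Dict.empty (by intro p hp; simp [PySem.Dict.empty] at hp))]
    rw [ih]

-- ===== VERDICT (by name: the statement is the Claim_ definition above) =====
theorem dup_intigente_spec : Claim_equal_dup_intigente := by
  intro dict_reg field dup _ _
  have hA : ∀ init : PySem.Dict Int (PySem.Dict String Int),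
      dict_reg.foldl (fun d registro => pvStepA field d (PySem.Dict.ofList registro)) init
        = (dict_reg.map PySem.Dict.ofList).foldl (pvStepA field) init := by
    intro init; rw [List.foldl_map]
  have hIx : pvIndex field dict_reg
      = (dict_reg.map PySem.Dict.ofList).foldl (pvIxStep field) PySem.Dict.empty := by
    unfold pvIndex pvIxStep pvKey; rw [List.foldl_map]
  unfold Spec_dup_intigente dup_intigente dup_intigente_alt
  rw [hIx, core field (dict_reg.map PySem.Dict.ofList), ← hA]
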